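-- pv_equiv track=rewrite | github.com/vmxmy/salary_system_v2 | webapp/v2/routers/reports/optimization.py | _categorize_views
-- ===== SOURCE A (Python) =====
-- from typing import Dict, Any, List
--
-- def _categorize_views(views: List[Dict[str, Any]]) -> Dict[str, List[str]]:
--     """对视图进行分类"""
--     categories = {
--         "payroll": [],
--         "hr": [],
--         "config": [],
--         "reports": [],
--         "other": []
--     }
--
--     for view in views:
--         view_name = view.get('name', '')
--         if 'payroll' in view_name:
--             categories['payroll'].append(view['full_name'])
--         elif 'employee' in view_name or 'hr' in view_name:
--             categories['hr'].append(view['full_name'])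
--         elif 'config' in view_name or 'lookup' in view_name:
--             categories['config'].append(view['full_name'])
--         elif 'report' in view_name:
--             categories['reports'].append(view['full_name'])
--         else:
--             categories['other'].append(view['full_name'])
--
--     return categories
-- ===== SOURCE B (Python) =====
-- from typing import Dict, Any, List
--
-- _RULES = [
--     ("payroll", ("payroll",)),
--     ("hr", ("employee", "hr")),
--     ("config", ("config", "lookup")),
--     ("reports", ("report",)),
-- ]
--
-- def _classify(view):
--     name = view.get('name', '')
--     for cat, keywords in _RULES:
--         if any(k in name for k in keywords):
--             return cat
--     return "other"
--
-- def _categorize_views(views: List[Dict[str, Any]]) -> Dict[str, List[str]]: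
--     return {cat: [view['full_name'] for view in views if _classify(view) == cat]
--             for cat in ("payroll", "hr", "config", "reports", "other")}
-- ===== Notes on version B (the rewrite author's own statement) =====
-- stated objective: idiomatic
-- what changed: Replaces the single pass mutating a pre-built dict through an if/elif chain with a data-driven rules table plus a first-match classifier, building the result as a grouping dict-comprehension (one filtered pass per category).
import Mathlib
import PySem

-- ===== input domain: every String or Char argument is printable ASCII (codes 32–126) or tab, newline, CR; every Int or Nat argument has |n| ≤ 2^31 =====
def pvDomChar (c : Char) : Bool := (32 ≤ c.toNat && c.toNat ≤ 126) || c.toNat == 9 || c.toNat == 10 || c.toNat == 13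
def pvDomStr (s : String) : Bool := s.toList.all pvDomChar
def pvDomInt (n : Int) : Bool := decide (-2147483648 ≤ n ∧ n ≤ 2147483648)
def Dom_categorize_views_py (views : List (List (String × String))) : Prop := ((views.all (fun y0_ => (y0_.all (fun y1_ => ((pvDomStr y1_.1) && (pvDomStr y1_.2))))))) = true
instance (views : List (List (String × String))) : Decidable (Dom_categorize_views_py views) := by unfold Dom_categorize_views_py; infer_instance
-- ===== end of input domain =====

-- B replaces A's if/elif chain mutating a dict by a rules-table classifier and a grouping
-- comprehension (one filtered pass per category); same return value, idiomatic decomposition.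


-- ===== PORT A =====
-- the initial dict literal {"payroll": [], "hr": [], "config": [], "reports": [], "other": []}
def pvCats0 : PySem.Dict String (List String) :=
  PySem.Dict.ofList [("payroll", []), ("hr", []), ("config", []), ("reports", []), ("other", [])]

-- A's loop body: view_name = view.get('name',''), then the if/elif chain appending view['full_name']
-- (view['full_name'] read with a default; Pre_ guarantees the key is present, Python raises otherwise)
def pvStepA (cats : PySem.Dict String (List String)) (view : List (String × String)) :
    PySem.Dict String (List String) :=
  let view_name := (view.lookup "name").getD ""
  if PySem.Str.isIn "payroll" view_name then
    cats.modify "payroll" [] (fun l => l ++ [(view.lookup "full_name").getD ""])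
  else if PySem.Str.isIn "employee" view_name || PySem.Str.isIn "hr" view_name then
    cats.modify "hr" [] (fun l => l ++ [(view.lookup "full_name").getD ""])
  else if PySem.Str.isIn "config" view_name || PySem.Str.isIn "lookup" view_name then
    cats.modify "config" [] (fun l => l ++ [(view.lookup "full_name").getD ""])
  else if PySem.Str.isIn "report" view_name then
    cats.modify "reports" [] (fun l => l ++ [(view.lookup "full_name").getD ""])
  else
    cats.modify "other" [] (fun l => l ++ [(view.lookup "full_name").getD ""])

def categorize_views_py (views : List (List (String × String))) : List (String × List String) :=
  (views.foldl pvStepA pvCats0).items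

-- ===== PORT B =====
def pvRules : List (String × List String) :=
  [("payroll", ["payroll"]), ("hr", ["employee", "hr"]),
   ("config", ["config", "lookup"]), ("reports", ["report"])]

def pvClassify (view : List (String × String)) : String :=
  let name := (view.lookup "name").getD ""
  match pvRules.find? (fun r => r.2.any (fun k => PySem.Str.isIn k name)) with
  | some r => r.1
  | none => "other"

def categorize_views_py_alt (views : List (List (String × String))) : List (String × List String) :=
  ["payroll", "hr", "config", "reports", "other"].map (fun cat =>
    (cat, (views.filter (fun v => pvClassify v == cat)).map
            (fun v => (v.lookup "full_name").getD "")))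

-- ===== PRECONDITION & SPEC =====
-- Pre_ excludes exactly the views lacking a 'full_name' key, on which Python A raises KeyError.
def Pre_categorize_views_py (views : List (List (String × String))) : Prop :=
  ∀ v ∈ views, (v.lookup "full_name").isSome = true
instance (views : List (List (String × String))) : Decidable (Pre_categorize_views_py views) := by
  unfold Pre_categorize_views_py; infer_instance

def pvWitness_categorize_views_py : (List (List (String × String))) :=
  [[("name", "payroll_entries"), ("full_name", "public.payroll_entries")],
   [("name", "misc"), ("full_name", "public.misc")]]

def Spec_categorize_views_py (views : List (List (String × String))) (out : List (String × List String)) : Prop := out = categorize_views_py_alt views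
instance (views : List (List (String × String))) (out : List (String × List String)) : Decidable (Spec_categorize_views_py views out) := by unfold Spec_categorize_views_py; infer_instance

-- ===== CLAIM (what is proved, stated in full; the proofs are below) =====
def Claim_equal_categorize_views_py : Prop := ∀ (views : List (List (String × String))), Dom_categorize_views_py views → Pre_categorize_views_py views → Spec_categorize_views_py views (categorize_views_py views)

-- ===== LEMMAS AND PROOFS =====

-- the category A's if/elif chain selects for a view
def pvKeyA (view : List (String × String)) : String :=
  let name := (view.lookup "name").getD ""
  if PySem.Str.isIn "payroll" name then "payroll"
  else if PySem.Str.isIn "employee" name || PySem.Str.isIn "hr" name then "hr"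
  else if PySem.Str.isIn "config" name || PySem.Str.isIn "lookup" name then "config"
  else if PySem.Str.isIn "report" name then "reports"
  else "other"

def pvFull (view : List (String × String)) : String := (view.lookup "full_name").getD ""

lemma stepA_eq_modify (d : PySem.Dict String (List String)) (v : List (String × String)) :
    pvStepA d v = d.modify (pvKeyA v) [] (fun l => l ++ [pvFull v]) := by
  unfold pvStepA pvKeyA pvFull
  dsimp only
  split_ifs <;> rfl

lemma classify_eq_keyA (v : List (String × String)) : pvClassify v = pvKeyA v := by
  unfold pvClassify pvRules pvKeyA
  dsimp only
  simp only [List.find?, List.any_cons, List.any_nil, Bool.or_false]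
  cases PySem.Str.isIn "payroll" ((List.lookup "name" v).getD "") <;>
  cases PySem.Str.isIn "employee" ((List.lookup "name" v).getD "") <;>
  cases PySem.Str.isIn "hr" ((List.lookup "name" v).getD "") <;>
  cases PySem.Str.isIn "config" ((List.lookup "name" v).getD "") <;>
  cases PySem.Str.isIn "lookup" ((List.lookup "name" v).getD "") <;>
  cases PySem.Str.isIn "report" ((List.lookup "name" v).getD "") <;> rfl

lemma keyA_mem (v : List (String × String)) :
    pvKeyA v ∈ ["payroll", "hr", "config", "reports", "other"] := by
  unfold pvKeyA
  dsimp only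
  split_ifs <;> simp

theorem categorize_views_py_spec : Claim_equal_categorize_views_py := by
  intro views _ _
  unfold Spec_categorize_views_py categorize_views_py categorize_views_py_alt
  have hstep : pvStepA = fun d v => d.modify (pvKeyA v) [] (fun l => l ++ [pvFull v]) := by
    funext d v; exact stepA_eq_modify d v
  rw [hstep]
  have hmap : views.foldl (fun d v => d.modify (pvKeyA v) [] (fun l => l ++ [pvFull v])) pvCats0
      = (views.map (fun v => (pvKeyA v, pvFull v))).foldl
          (fun d p => d.modify p.1 [] (fun l => l ++ [p.2])) pvCats0 := by
    rw [List.foldl_map]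
  rw [hmap]
  set L := views.map (fun v => (pvKeyA v, pvFull v)) with hL
  set D := L.foldl (fun d p => d.modify p.1 [] (fun l => l ++ [p.2])) pvCats0 with hD
  have hkeys : D.keys = ["payroll", "hr", "config", "reports", "other"] := by
    rw [hD]
    have h1 : L.foldl (fun d p => d.modify p.1 [] (fun l => l ++ [p.2])) pvCats0
        = L.foldl (fun d p => d.modify ((fun q : String × String => q.1) p) []
            ((fun (_ : PySem.Dict String (List String)) (p : String × String)
                (l : List String) => l ++ [p.2]) d p)) pvCats0 := rfl
    rw [h1, PySem.Dict.keys_foldl_modify_key]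
    have hk : pvCats0.keys = ["payroll", "hr", "config", "reports", "other"] := by decide
    rw [hk, PySem.Set.update_eq_append_filter]
    have : (PySem.Set.ofList (L.map (fun q : String × String => q.1))).filter
        (fun y => !(PySem.Set.contains ["payroll", "hr", "config", "reports", "other"] y)) = [] := by
      rw [List.filter_eq_nil_iff]
      intro y hy
      have hy' : y ∈ L.map (fun q : String × String => q.1) :=
        (PySem.List.mem_dedup _ y).mp hy
      rw [hL] at hy'
      simp only [List.map_map, List.mem_map] at hy'
      obtain ⟨v, _, hv⟩ := hy'
      have hmem : y ∈ ["payroll", "hr", "config", "reports", "other"] := by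
        rw [← hv]; exact keyA_mem v
      simp [PySem.Set.contains]
      intro h1 h2 h3 h4; simp at hmem; tauto
    rw [this, List.append_nil]
  have hnd : D.keys.Nodup := by rw [hkeys]; decide
  have hitems := PySem.Dict.items_eq_map_keys D hnd ([] : List String)
  rw [hitems, hkeys]
  have hgetD : ∀ c : String, D.getD c [] = pvCats0.getD c []
      ++ (L.filter (fun p => p.1 == c)).map (fun p => p.2) := by
    intro c; rw [hD]; exact PySem.Dict.getD_foldl_modify_append L pvCats0 c
  have hfil : ∀ c : String, (L.filter (fun p => p.1 == c)).map (fun p => p.2)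
      = (views.filter (fun v => pvClassify v == c)).map (fun v => (v.lookup "full_name").getD "") := by
    intro c
    rw [hL, List.filter_map, List.map_map]
    have h1 : ((fun p : String × String => p.1 == c) ∘ (fun v => (pvKeyA v, pvFull v)))
        = (fun v => pvClassify v == c) := by
      funext v; simp [Function.comp, classify_eq_keyA]
    have h2 : ((fun p : String × String => p.2) ∘ (fun v => (pvKeyA v, pvFull v)))
        = (fun v : List (String × String) => (v.lookup "full_name").getD "") := by
      funext v; simp [Function.comp, pvFull]
    rw [h1, h2]
  simp only [List.map_cons, List.map_nil, hgetD]
  rw [hfil "payroll", hfil "hr", hfil "config", hfil "reports", hfil "other"]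
  rfl
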